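-- pv_equiv track=rewrite | github.com/jianershi/algorithm | 1364.py | build_value_map
-- ===== SOURCE A (Python) =====
-- class DataType:
--     START_POINT = -2
--     END_POINT = -3
--     OBSTACLE = -1
--
-- def build_value_map(mazeMap):
--     start_point = None
--     gateway_location = {}
--     n = len(mazeMap)
--     m = len(mazeMap[0])
--     for i in range(n):
--         for j in range(m):
--             if mazeMap[i][j] == DataType.START_POINT:
--                 start_point = (i, j)
--             if mazeMap[i][j] <= 0:
--                 continue
--             gateway_location[mazeMap[i][j]] = gateway_location.get(mazeMap[i][j], set())
--             gateway_location[mazeMap[i][j]].add((i, j))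
--     return (start_point, gateway_location)
-- ===== SOURCE B (Python) =====
-- class DataType:
--     START_POINT = -2
--     END_POINT = -3
--     OBSTACLE = -1
--
-- def build_value_map(mazeMap):
--     m = len(mazeMap[0])
--     cells = [(i, j, row[j]) for i, row in enumerate(mazeMap) for j in range(m)]
--     starts = [(i, j) for (i, j, v) in cells if v == DataType.START_POINT]
--     start_point = starts[-1] if starts else None
--     gateway_location = {}
--     for (i, j, v) in cells:
--         if v > 0:
--             gateway_location.setdefault(v, set()).add((i, j))
--     return (start_point, gateway_location)
-- ===== Notes on version B (the rewrite author's own statement) =====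
-- stated objective: alternative
-- what changed: A's single fused nested-index loop with joint (start, dict) state is replaced by a flatten-enumerate decomposition: one comprehension builds the cell list, the start point is the last element of a filtered comprehension, and the gateway dict is grouped in a separate setdefault pass.
import Mathlib
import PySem

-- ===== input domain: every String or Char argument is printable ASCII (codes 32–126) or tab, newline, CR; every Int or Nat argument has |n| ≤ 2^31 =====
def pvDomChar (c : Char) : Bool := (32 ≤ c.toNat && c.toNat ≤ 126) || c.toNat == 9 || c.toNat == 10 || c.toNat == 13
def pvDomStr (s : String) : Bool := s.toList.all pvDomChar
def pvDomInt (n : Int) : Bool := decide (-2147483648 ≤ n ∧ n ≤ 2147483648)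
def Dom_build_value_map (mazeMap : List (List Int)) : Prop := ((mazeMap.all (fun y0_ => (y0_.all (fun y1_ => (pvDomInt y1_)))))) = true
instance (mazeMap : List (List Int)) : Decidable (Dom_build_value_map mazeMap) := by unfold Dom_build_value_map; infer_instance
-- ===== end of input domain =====

-- B replaces A's single fused nested-index loop by a flatten-enumerate decomposition: cell list,
-- last filtered start, and a separate grouping pass (objective: alternative, same cost).

-- ===== PORT A =====
-- A's fused pass: for i in range(n): for j in range(m): update start_point and gateway_location in one state.
def build_value_map (mazeMap : List (List Int)) : (Option (Int × Int)) × (List (Int × List (Int × Int))) :=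
  let n : Int := PySem.List.len mazeMap
  let m : Int := PySem.List.len (PySem.List.pyGetD mazeMap 0 [])  -- len(mazeMap[0]); IndexError on [] excluded by Pre_
  let st := (PySem.List.pyRange 0 n).foldl (fun st i =>
    (PySem.List.pyRange 0 m).foldl
      (fun (st : Option (Int × Int) × PySem.Dict Int (PySem.Set (Int × Int))) j =>
        -- mazeMap[i][j]; out-of-range (IndexError) excluded by Pre_
        let v := PySem.List.pyGetD (PySem.List.pyGetD mazeMap i []) j 0
        let sp := if v = -2 then some (i, j) else st.1
        if v ≤ 0 then (sp, st.2)
        else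
          let s := st.2.getD v PySem.Set.empty
          let d1 := st.2.insert v s
          (sp, d1.insert v (PySem.Set.add s (i, j))))
      st) ((none : Option (Int × Int)), (PySem.Dict.empty : PySem.Dict Int (PySem.Set (Int × Int))))
  (st.1, st.2.items)

-- ===== PORT B =====
def build_value_map_alt (mazeMap : List (List Int)) : (Option (Int × Int)) × (List (Int × List (Int × Int))) :=
  let m : Int := PySem.List.len (PySem.List.pyGetD mazeMap 0 [])  -- len(mazeMap[0]); IndexError on [] excluded by Pre_
  let cells : List (Int × Int × Int) :=
    (PySem.List.enumerate mazeMap).flatMap (fun p =>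
      (PySem.List.pyRange 0 m).map (fun j => (p.1, j, PySem.List.pyGetD p.2 j 0)))
  let starts := (cells.filter (fun c => c.2.2 = -2)).map (fun c => (c.1, c.2.1))
  let start_point := starts.getLast?          -- starts[-1] if starts else None
  let gw := cells.foldl
      (fun (d : PySem.Dict Int (PySem.Set (Int × Int))) c =>
        if 0 < c.2.2 then d.modify c.2.2 PySem.Set.empty (fun s => PySem.Set.add s (c.1, c.2.1)) else d)
      PySem.Dict.empty
  (start_point, gw.items)

-- ===== PRECONDITION & SPEC =====
-- Pre_ excludes exactly the inputs where the Python raises IndexError: the empty grid (mazeMap[0])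
-- and grids with a row shorter than the first row (mazeMap[i][j] out of range).
def Pre_build_value_map (mazeMap : List (List Int)) : Prop :=
  mazeMap ≠ [] ∧ ∀ row ∈ mazeMap, (mazeMap.headD []).length ≤ row.length
instance (mazeMap : List (List Int)) : Decidable (Pre_build_value_map mazeMap) := by
  unfold Pre_build_value_map; infer_instance
def pvWitness_build_value_map : List (List Int) := [[-2, 1], [1, 0]]
def Spec_build_value_map (mazeMap : List (List Int)) (out : (Option (Int × Int)) × (List (Int × List (Int × Int)))) : Prop := out = build_value_map_alt mazeMap
instance (mazeMap : List (List Int)) (out : (Option (Int × Int)) × (List (Int × List (Int × Int)))) : Decidable (Spec_build_value_map mazeMap out) := by unfold Spec_build_value_map; infer_instance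

-- ===== CLAIM (what is proved, stated in full; the proofs are below) =====
def Claim_equal_build_value_map : Prop := ∀ (mazeMap : List (List Int)), Dom_build_value_map mazeMap → Pre_build_value_map mazeMap → Spec_build_value_map mazeMap (build_value_map mazeMap)

-- ===== LEMMAS AND PROOFS =====

-- the value A reads at cell (i, j) (total form of mazeMap[i][j]; Pre_ keeps indices in range)
def pvVal (mazeMap : List (List Int)) (i j : Int) : Int :=
  PySem.List.pyGetD (PySem.List.pyGetD mazeMap i []) j 0

-- B's flattened cell list
def pvCells (mazeMap : List (List Int)) (m : Int) : List (Int × Int × Int) :=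
  (PySem.List.enumerate mazeMap).flatMap (fun p =>
    (PySem.List.pyRange 0 m).map (fun j => (p.1, j, PySem.List.pyGetD p.2 j 0)))

-- A's per-cell step (zeta-reduced body of A's inner loop)
def pvFA (st : Option (Int × Int) × PySem.Dict Int (PySem.Set (Int × Int))) (c : Int × Int × Int) :
    Option (Int × Int) × PySem.Dict Int (PySem.Set (Int × Int)) :=
  if c.2.2 ≤ 0 then (if c.2.2 = -2 then some (c.1, c.2.1) else st.1, st.2)
  else (if c.2.2 = -2 then some (c.1, c.2.1) else st.1,
        (st.2.insert c.2.2 (st.2.getD c.2.2 PySem.Set.empty)).insert c.2.2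
          ((st.2.getD c.2.2 PySem.Set.empty).add (c.1, c.2.1)))

-- the two independent per-cell steps
def pvSA (a : Option (Int × Int)) (c : Int × Int × Int) : Option (Int × Int) :=
  if c.2.2 = -2 then some (c.1, c.2.1) else a

def pvGA (d : PySem.Dict Int (PySem.Set (Int × Int))) (c : Int × Int × Int) :
    PySem.Dict Int (PySem.Set (Int × Int)) :=
  if c.2.2 ≤ 0 then d
  else (d.insert c.2.2 (d.getD c.2.2 PySem.Set.empty)).insert c.2.2
         ((d.getD c.2.2 PySem.Set.empty).add (c.1, c.2.1))

-- B's per-cell dict step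
def pvGB (d : PySem.Dict Int (PySem.Set (Int × Int))) (c : Int × Int × Int) :
    PySem.Dict Int (PySem.Set (Int × Int)) :=
  if 0 < c.2.2 then d.modify c.2.2 PySem.Set.empty (fun s => PySem.Set.add s (c.1, c.2.1)) else d

-- A's nested index loop is a fold over the flattened cell list
theorem foldl_nested_eq_cells {σ : Type} (mazeMap : List (List Int)) (m : Int)
    (f : σ → (Int × Int × Int) → σ) (init : σ) :
    (PySem.List.pyRange 0 (PySem.List.len mazeMap)).foldl (fun st i =>
        (PySem.List.pyRange 0 m).foldl (fun st j => f st (i, j, pvVal mazeMap i j)) st) init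
      = (pvCells mazeMap m).foldl f init := by
  unfold pvCells
  rw [PySem.List.enumerate_eq_map_pyRange mazeMap []]
  simp [List.foldl_flatMap, List.foldl_map, pvVal]

-- A's fused step is the product of the two independent steps
theorem pvFA_eq_prod : pvFA = fun st c => (pvSA st.1 c, pvGA st.2 c) := by
  funext st c
  unfold pvFA pvSA pvGA
  by_cases h : c.2.2 ≤ 0 <;> simp [h]

-- A's per-cell dict step equals B's per-cell dict step
theorem pvGA_eq_pvGB : pvGA = pvGB := by
  funext d c
  unfold pvGA pvGB
  by_cases h : c.2.2 ≤ 0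
  · simp [h, not_lt.mpr h]
  · have : PySem.Dict.modify d c.2.2 PySem.Set.empty (fun s => PySem.Set.add s (c.1, c.2.1))
        = d.insert c.2.2 ((d.getD c.2.2 PySem.Set.empty).add (c.1, c.2.1)) := rfl
    simp only [h, if_false, lt_of_not_ge h, if_true, PySem.Dict.insert_insert_self, this]

-- "keep the last match" fold = getLast? of the filtered-and-mapped list (or the initial value)
theorem foldl_lastSome {α β : Type} (p : α → Prop) [DecidablePred p] (g : α → β) :
    ∀ (l : List α) (init : Option β),
      l.foldl (fun a c => if p c then some (g c) else a) init
        = (((l.filter (fun c => decide (p c))).map g).reverse.head?).or init := by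
  intro l
  induction l with
  | nil => intro init; simp
  | cons c cs ih =>
    intro init
    by_cases hp : p c
    · simp only [List.foldl_cons, List.filter_cons, hp, decide_true, if_true, List.map_cons,
        List.reverse_cons, List.head?_append, ih]
      cases h : ((cs.filter (fun c => decide (p c))).map g).reverse.head? <;>
        simp [Option.or]
    · simp [List.foldl_cons, hp, ih]

-- ===== VERDICT (by name: the statement is the Claim_ definition above) =====
theorem build_value_map_spec : Claim_equal_build_value_map := by
  intro mazeMap _ _
  unfold Spec_build_value_map build_value_map build_value_map_alt
  simp only []
  show
    (((PySem.List.pyRange 0 (PySem.List.len mazeMap)).foldl (fun st i =>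
        (PySem.List.pyRange 0 (PySem.List.len (PySem.List.pyGetD mazeMap 0 []))).foldl
          (fun st j => pvFA st (i, j, pvVal mazeMap i j)) st)
        ((none : Option (Int × Int)), (PySem.Dict.empty : PySem.Dict Int (PySem.Set (Int × Int))))).1,
     ((PySem.List.pyRange 0 (PySem.List.len mazeMap)).foldl (fun st i =>
        (PySem.List.pyRange 0 (PySem.List.len (PySem.List.pyGetD mazeMap 0 []))).foldl
          (fun st j => pvFA st (i, j, pvVal mazeMap i j)) st)
        ((none : Option (Int × Int)), (PySem.Dict.empty : PySem.Dict Int (PySem.Set (Int × Int))))).2.items)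
    = ((((pvCells mazeMap (PySem.List.len (PySem.List.pyGetD mazeMap 0 []))).filter
            (fun c => decide (c.2.2 = -2))).map (fun c => (c.1, c.2.1))).getLast?,
       ((pvCells mazeMap (PySem.List.len (PySem.List.pyGetD mazeMap 0 []))).foldl pvGB
          PySem.Dict.empty).items)
  rw [foldl_nested_eq_cells mazeMap (PySem.List.len (PySem.List.pyGetD mazeMap 0 [])) pvFA
        ((none : Option (Int × Int)), (PySem.Dict.empty : PySem.Dict Int (PySem.Set (Int × Int)))),
      pvFA_eq_prod, PySem.List.foldl_prod_mk, ← pvGA_eq_pvGB]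
  refine Prod.ext ?_ rfl
  show (pvCells mazeMap (PySem.List.len (PySem.List.pyGetD mazeMap 0 []))).foldl
      (fun a c => if c.2.2 = -2 then some (c.1, c.2.1) else a) none = _
  rw [foldl_lastSome (fun c : Int × Int × Int => c.2.2 = -2) (fun c => (c.1, c.2.1))]
  simp [List.head?_reverse]
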